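-- pv_equiv track=rewrite | github.com/seonjiwon/Python-Algorithm | algorithm/dynamic_programming/easy_stair_number_10844.py | stair_number_count
-- ===== SOURCE A (Python) =====
-- def stair_number_count(n):
--   dp = [[0] * 10 for _ in range(n+1)]
--   dp[1] = [0,1,1,1,1,1,1,1,1,1]
--
--   for i in range(2, n+1):
--     for j in range(10):
--       if j == 0:
--         dp[i][j] = dp[i-1][j+1]
--       elif j == 9:
--         dp[i][j] = dp[i-1][j-1]
--       else:
--         dp[i][j] = dp[i-1][j-1] + dp[i-1][j+1]
--   return sum(dp[n]) % 1000000000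
-- ===== SOURCE B (Python) =====
-- def stair_number_count(n):
--   def mat_mul(a, b):
--     return [[sum(a[i][k] * b[k][j] for k in range(10)) % 1000000000 for j in range(10)]
--             for i in range(10)]
--
--   def mat_pow(m, k):
--     if k == 0:
--       return [[1 if i == j else 0 for j in range(10)] for i in range(10)]
--     h = mat_pow(m, k // 2)
--     h2 = mat_mul(h, h)
--     return mat_mul(h2, m) if k % 2 == 1 else h2
--
--   trans = [[1 if abs(i - j) == 1 else 0 for j in range(10)] for i in range(10)]
--   v = [0, 1, 1, 1, 1, 1, 1, 1, 1, 1]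
--   p = mat_pow(trans, n - 1)
--   row = [sum(v[k] * p[k][j] for k in range(10)) for j in range(10)]
--   return sum(row) % 1000000000
-- ===== Notes on version B (the rewrite author's own statement) =====
-- stated objective: faster
-- what changed: Replaces the linear row-by-row DP over the full table by binary exponentiation of the 10x10 tridiagonal digit-transition matrix (entries reduced mod 1000000000) applied to the initial digit-count vector.
-- outside the precondition, e.g. on stair_number_count(0): A raises IndexError, B raises RecursionError; on stair_number_count(-1): A raises IndexError, B raises RecursionError
import Mathlib
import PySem

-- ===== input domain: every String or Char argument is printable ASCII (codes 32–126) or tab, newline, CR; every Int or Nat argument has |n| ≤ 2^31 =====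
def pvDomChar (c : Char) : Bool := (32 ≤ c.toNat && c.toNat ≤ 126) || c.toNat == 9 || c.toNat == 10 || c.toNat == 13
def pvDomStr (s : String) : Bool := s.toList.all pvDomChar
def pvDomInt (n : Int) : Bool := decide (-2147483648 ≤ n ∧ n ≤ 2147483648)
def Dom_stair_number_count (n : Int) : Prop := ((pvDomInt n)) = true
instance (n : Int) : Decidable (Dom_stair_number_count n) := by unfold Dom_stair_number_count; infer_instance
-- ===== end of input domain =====

-- B replaces A's O(n) row-by-row DP by binary exponentiation of the 10x10 transition matrix (faster).

-- ===== PORT A =====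
-- one DP step: row i from row i-1 (the inner 'for j in range(10)' loop)
def stepA (prev : List Int) : List Int :=
  (List.range 10).map (fun j =>
    if j = 0 then prev.getD (j+1) 0
    else if j = 9 then prev.getD (j-1) 0
    else prev.getD (j-1) 0 + prev.getD (j+1) 0)

-- dp rows: the seeded second row, then the outer loop builds each row from the previous one
def rowA : Nat → List Int
  | 0 => List.replicate 10 0
  | 1 => [0,1,1,1,1,1,1,1,1,1]
  | (k+2) => stepA (rowA (k+1))

def stair_number_count (n : Int) : Int :=
  if n < 1 then 0   -- totalization only: Pre_ excludes nonpositive n (Python raises IndexError there)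
  else PySem.Int.mod (rowA n.toNat).sum 1000000000

-- ===== PORT B =====
def mgetB (m : List (List Int)) (i j : Nat) : Int := (m.getD i []).getD j 0

def matMulB (a b : List (List Int)) : List (List Int) :=
  (List.range 10).map (fun i => (List.range 10).map (fun j =>
    PySem.Int.mod ((List.range 10).map (fun k => mgetB a i k * mgetB b k j)).sum 1000000000))

def matIdB : List (List Int) :=
  (List.range 10).map (fun i => (List.range 10).map (fun j => if i = j then 1 else 0))

def matPowB (m : List (List Int)) (k : Nat) : List (List Int) :=
  if h : k = 0 then matIdB
  else
    let hm := matPowB m (k / 2)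
    let h2 := matMulB hm hm
    if k % 2 = 1 then matMulB h2 m else h2
decreasing_by exact Nat.div_lt_self (Nat.pos_of_ne_zero h) (by norm_num)

def transB : List (List Int) :=
  (List.range 10).map (fun i => (List.range 10).map (fun j =>
    if ((i : Int) - (j : Int)).natAbs = 1 then 1 else 0))

def vecB : List Int := [0,1,1,1,1,1,1,1,1,1]

def stair_number_count_alt (n : Int) : Int :=
  if n < 1 then 0   -- totalization only: Pre_ excludes nonpositive n
  else
    let p := matPowB transB (n.toNat - 1)
    let row := (List.range 10).map (fun j =>
      ((List.range 10).map (fun k => vecB.getD k 0 * mgetB p k j)).sum)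
    PySem.Int.mod row.sum 1000000000

-- ===== PRECONDITION & SPEC =====
-- Python A raises IndexError on nonpositive n (the seeded dp row does not exist); those inputs are excluded.
def Pre_stair_number_count (n : Int) : Prop := 1 ≤ n
instance (n : Int) : Decidable (Pre_stair_number_count n) := by unfold Pre_stair_number_count; infer_instance
def pvWitness_stair_number_count : Int := 3

def Spec_stair_number_count (n : Int) (out : Int) : Prop := out = stair_number_count_alt n
instance (n : Int) (out : Int) : Decidable (Spec_stair_number_count n out) := by unfold Spec_stair_number_count; infer_instance

-- ===== CLAIM (what is proved, stated in full; the proofs are below) =====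
def Claim_equal_stair_number_count : Prop := ∀ (n : Int), Dom_stair_number_count n → Pre_stair_number_count n → Spec_stair_number_count n (stair_number_count n)

-- ===== LEMMAS AND PROOFS =====

-- A-side matrix semantics over the integers
def toMat (m : List (List Int)) : Matrix (Fin 10) (Fin 10) Int :=
  fun i j => mgetB m i.val j.val

-- B-side matrix semantics modulo 1000000000
def toMatZ (m : List (List Int)) : Matrix (Fin 10) (Fin 10) (ZMod 1000000000) :=
  fun i j => ((mgetB m i.val j.val : Int) : ZMod 1000000000)

def toVecF (l : List Int) : Fin 10 → Int := fun j => l.getD j.val 0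

def vz : Fin 10 → ZMod 1000000000 := fun k => ((vecB.getD k.val 0 : Int) : ZMod 1000000000)

theorem sum_map_range10 (f : Nat → Int) :
    ((List.range 10).map f).sum = ∑ i ∈ Finset.range 10, f i := by
  simp [List.range_succ, Finset.sum_range_succ]
  ring

theorem getD_map_range10 {α : Type} [Inhabited α] (f : Nat → α) (d : α) (i : Nat) (h : i < 10) :
    ((List.range 10).map f).getD i d = f i := by
  rw [List.getD_eq_getElem _ _ (by simpa using h)]
  simp

theorem castPyMod (x : Int) :
    ((PySem.Int.mod x 1000000000 : Int) : ZMod 1000000000) = (x : ZMod 1000000000) := by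
  rw [PySem.Int.mod_eq_emod_of_pos (show (0:Int) < 1000000000 by norm_num)]
  have h := ZMod.intCast_mod x 1000000000
  simpa using h

theorem mget_matMulB (a b : List (List Int)) (i j : Fin 10) :
    mgetB (matMulB a b) i.val j.val
      = PySem.Int.mod (∑ k ∈ Finset.range 10, mgetB a i.val k * mgetB b k j.val) 1000000000 := by
  unfold mgetB matMulB
  rw [getD_map_range10 _ _ _ i.isLt, getD_map_range10 _ _ _ j.isLt]
  rw [sum_map_range10]
  rfl

theorem toMatZ_matMulB (a b : List (List Int)) :
    toMatZ (matMulB a b) = toMatZ a * toMatZ b := by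
  funext i j
  rw [Matrix.mul_apply]
  show ((mgetB (matMulB a b) i.val j.val : Int) : ZMod 1000000000) = _
  rw [mget_matMulB, castPyMod]
  push_cast
  rw [← Fin.sum_univ_eq_sum_range
    (fun k => ((mgetB a i.val k : Int) : ZMod 1000000000) * ((mgetB b k j.val : Int) : ZMod 1000000000)) 10]
  rfl

theorem toMatZ_matIdB : toMatZ matIdB = 1 := by
  funext i j
  unfold toMatZ mgetB matIdB
  rw [getD_map_range10 _ _ _ i.isLt, getD_map_range10 _ _ _ j.isLt, Matrix.one_apply]
  by_cases h : i = j
  · simp [h]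
  · have hv : i.val ≠ j.val := fun hv => h (Fin.val_injective hv)
    simp [h, hv]

theorem toMatZ_matPowB (m : List (List Int)) (k : Nat) :
    toMatZ (matPowB m k) = (toMatZ m) ^ k := by
  induction k using Nat.strong_induction_on with
  | _ k ih =>
    rw [matPowB]
    by_cases h : k = 0
    · rw [dif_pos h, h, pow_zero, toMatZ_matIdB]
    · have hlt : k / 2 < k := Nat.div_lt_self (Nat.pos_of_ne_zero h) (by norm_num)
      have hrec := ih (k / 2) hlt
      rw [dif_neg h]
      by_cases ho : k % 2 = 1
      · have hk : k = k / 2 + k / 2 + 1 := by omega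
        simp only [ho, if_pos]
        rw [toMatZ_matMulB, toMatZ_matMulB, hrec]
        rw [← pow_add, ← pow_succ]
        rw [← hk]
      · have hk : k = k / 2 + k / 2 := by omega
        simp only [ho, if_neg, not_false_iff]
        rw [toMatZ_matMulB, hrec, ← pow_add, ← hk]

theorem toVecF_ofFn (w : Fin 10 → Int) : toVecF (List.ofFn w) = w := by
  funext j
  unfold toVecF
  rw [List.getD_eq_getElem _ _ (by simp [j.isLt]), List.getElem_ofFn]

-- the transition matrix as a literal table
theorem transB_eq : transB =
  [[0,1,0,0,0,0,0,0,0,0],[1,0,1,0,0,0,0,0,0,0],[0,1,0,1,0,0,0,0,0,0],[0,0,1,0,1,0,0,0,0,0],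
   [0,0,0,1,0,1,0,0,0,0],[0,0,0,0,1,0,1,0,0,0],[0,0,0,0,0,1,0,1,0,0],[0,0,0,0,0,0,1,0,1,0],
   [0,0,0,0,0,0,0,1,0,1],[0,0,0,0,0,0,0,0,1,0]] := by decide

-- the step function is multiplication by the transition matrix
theorem stepA_vm (l : List Int) :
    stepA l = List.ofFn (Matrix.vecMul (toVecF l) (toMat transB)) := by
  unfold stepA
  apply List.ext_getElem
  · simp
  · intro i h1 h2
    simp only [List.length_map, List.length_range] at h1
    rw [List.getElem_map, List.getElem_range, List.getElem_ofFn]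
    show _ = dotProduct (toVecF l) _
    unfold dotProduct toVecF toMat
    rw [Fin.sum_univ_eq_sum_range (fun k => l.getD k 0 * mgetB transB k i) 10]
    simp only [Finset.sum_range_succ, Finset.sum_range_zero]
    interval_cases i <;>
      · simp [mgetB, transB_eq]
        try ring

-- A's row of index k+1 equals the initial vector times the k-th matrix power
theorem rowA_eq (k : Nat) :
    rowA (k+1) = List.ofFn (Matrix.vecMul (toVecF vecB) ((toMat transB) ^ k)) := by
  induction k with
  | zero =>
    rw [pow_zero, Matrix.vecMul_one]
    decide
  | succ k ih =>
    show stepA (rowA (k+1)) = _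
    rw [ih, stepA_vm, toVecF_ofFn, Matrix.vecMul_vecMul, ← pow_succ]

-- casting the k-th power of the integer transition matrix entrywise gives the mod-10^9 power
theorem toMat_pow_cast (k : Nat) :
    ((toMat transB) ^ k).map (Int.cast : Int → ZMod 1000000000) = (toMatZ transB) ^ k := by
  have h := map_pow ((Int.castRingHom (ZMod 1000000000)).mapMatrix) (toMat transB) k
  simp only [RingHom.mapMatrix_apply, Int.coe_castRingHom] at h
  have h2 : (toMat transB).map (Int.cast : Int → ZMod 1000000000) = toMatZ transB := by
    funext i j; rfl
  rw [h, h2]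

-- A's final sum, reduced mod 10^9
theorem sumA_cast (k : Nat) :
    (((rowA (k+1)).sum : Int) : ZMod 1000000000)
      = ∑ j : Fin 10, ∑ t : Fin 10, vz t * ((toMatZ transB) ^ k) t j := by
  rw [rowA_eq, List.sum_ofFn]
  push_cast
  refine Finset.sum_congr rfl (fun j _ => ?_)
  show ((dotProduct (toVecF vecB) (fun t => ((toMat transB) ^ k) t j) : Int) : ZMod 1000000000) = _
  unfold dotProduct
  push_cast
  refine Finset.sum_congr rfl (fun t _ => ?_)
  have : (((((toMat transB) ^ k) t j : Int)) : ZMod 1000000000)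
      = (((toMat transB) ^ k).map (Int.cast : Int → ZMod 1000000000)) t j := rfl
  rw [this, toMat_pow_cast]
  rfl

theorem finsum_to_range (F : Nat → Nat → ZMod 1000000000) :
    (∑ j : Fin 10, ∑ t : Fin 10, F t.val j.val)
      = ∑ j ∈ Finset.range 10, ∑ t ∈ Finset.range 10, F t j := by
  rw [Fin.sum_univ_eq_sum_range (fun j => ∑ t : Fin 10, F t.val j) 10]
  exact Finset.sum_congr rfl (fun j _ => Fin.sum_univ_eq_sum_range (fun t => F t j) 10)

-- B's final sum, reduced mod 10^9
theorem sumB_cast (k : Nat) :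
    ((((List.range 10).map (fun j =>
        ((List.range 10).map (fun t => vecB.getD t 0 * mgetB (matPowB transB k) t j)).sum)).sum : Int)
      : ZMod 1000000000)
      = ∑ j : Fin 10, ∑ t : Fin 10, vz t * ((toMatZ transB) ^ k) t j := by
  rw [← toMatZ_matPowB transB k]
  have hR : (∑ j : Fin 10, ∑ t : Fin 10, vz t * toMatZ (matPowB transB k) t j)
      = ∑ j ∈ Finset.range 10, ∑ t ∈ Finset.range 10,
          ((vecB.getD t 0 : Int) : ZMod 1000000000)
            * ((mgetB (matPowB transB k) t j : Int) : ZMod 1000000000) :=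
    finsum_to_range (fun t j => ((vecB.getD t 0 : Int) : ZMod 1000000000)
      * ((mgetB (matPowB transB k) t j : Int) : ZMod 1000000000))
  rw [hR, sum_map_range10]
  simp only [sum_map_range10]
  push_cast
  rfl

-- ===== VERDICT (by name: the statement is the Claim_ definition above) =====
theorem stair_number_count_spec : Claim_equal_stair_number_count := by
  intro n _ hpre
  unfold Spec_stair_number_count stair_number_count stair_number_count_alt
  have hn : ¬ n < 1 := by exact not_lt.mpr hpre
  simp only [hn, if_neg, not_false_iff]
  have hk : n.toNat = (n.toNat - 1) + 1 := by omega
  rw [PySem.Int.mod_eq_emod_of_pos (show (0:Int) < 1000000000 by norm_num),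
    PySem.Int.mod_eq_emod_of_pos (show (0:Int) < 1000000000 by norm_num)]
  have hz := (sumA_cast (n.toNat - 1)).trans (sumB_cast (n.toNat - 1)).symm
  rw [hk] at hz ⊢
  have h := (ZMod.intCast_eq_intCast_iff' _ _ 1000000000).mp hz
  simpa using h
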